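-- pv_equiv track=rewrite | github.com/hazemmasarani/dc3-skew-algorithm | dc3-engine/dc3.py | build_sample_indices
-- ===== SOURCE A (Python) =====
-- def build_sample_indices(n):
--     idx = []
--     for i in range(1, n - 3, 3):
--         idx.append(i)
--     idx.append(n - 3)
--     for i in range(2, n - 3, 3):
--         idx.append(i)
--     return idx
-- ===== SOURCE B (Python) =====
-- def build_sample_indices(n):
--     ones, twos = [], []
--     for i in range(1, n - 3):
--         r = i % 3
--         if r == 1:
--             ones.append(i)
--         elif r == 2:
--             twos.append(i)
--     return ones + [n - 3] + twos
-- ===== Notes on version B (the rewrite author's own statement) =====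
-- stated objective: alternative
-- what changed: Replaces A's two strided loops by a single pass over the full index range that classifies each index by its residue mod three into two accumulators, then concatenates the first bucket, the unconditional middle element, and the second bucket.
import Mathlib
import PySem

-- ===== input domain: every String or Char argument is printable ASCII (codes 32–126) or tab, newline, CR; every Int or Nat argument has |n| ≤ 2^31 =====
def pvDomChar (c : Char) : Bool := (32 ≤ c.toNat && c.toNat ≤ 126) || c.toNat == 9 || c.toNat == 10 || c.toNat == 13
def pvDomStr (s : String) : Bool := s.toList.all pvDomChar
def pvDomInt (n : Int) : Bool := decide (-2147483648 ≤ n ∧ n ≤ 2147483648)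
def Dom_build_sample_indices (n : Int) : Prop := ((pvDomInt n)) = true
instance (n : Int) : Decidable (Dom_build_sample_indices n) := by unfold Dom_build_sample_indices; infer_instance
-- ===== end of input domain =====

-- B replaces A's two strided loops by one pass over the full index range, classifying each
-- index by its residue mod three into two accumulators (objective: alternative decomposition, same cost).

-- ===== PORT A =====
def build_sample_indices (n : Int) : List Int :=
  let idx : List Int := []
  let idx := (PySem.List.pyRange 1 (n - 3) 3).foldl (fun acc i => acc ++ [i]) idx
  let idx := idx ++ [n - 3]
  let idx := (PySem.List.pyRange 2 (n - 3) 3).foldl (fun acc i => acc ++ [i]) idx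
  idx

-- ===== PORT B =====
def build_sample_indices_alt (n : Int) : List Int :=
  let p := (PySem.List.pyRange 1 (n - 3) 1).foldl
    (fun (p : List Int × List Int) i =>
      let r := PySem.Int.mod i 3
      if r = 1 then (p.1 ++ [i], p.2)
      else if r = 2 then (p.1, p.2 ++ [i])
      else p) ([], [])
  p.1 ++ [n - 3] ++ p.2

-- ===== PRECONDITION & SPEC =====
def Spec_build_sample_indices (n : Int) (out : List Int) : Prop := out = build_sample_indices_alt n
instance (n : Int) (out : List Int) : Decidable (Spec_build_sample_indices n out) := by unfold Spec_build_sample_indices; infer_instance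

-- ===== CLAIM (what is proved, stated in full; the proofs are below) =====
def Claim_equal_build_sample_indices : Prop := ∀ (n : Int), Dom_build_sample_indices n → Spec_build_sample_indices n (build_sample_indices n)

-- ===== LEMMAS AND PROOFS =====

-- a positive-step range with empty bounds is nil
theorem pvRange_eq_nil (a b s : Int) (hs : 0 < s) (h : b ≤ a) :
    PySem.List.pyRange a b s = [] := by
  rw [PySem.List.pyRange_of_pos a b hs, if_neg (by omega)]
  simp

-- extending the stop of a step-3 range by one appends the endpoint iff it is on-stride
theorem pvRange3_succ (a m : Int) (h : a ≤ m + 1) :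
    PySem.List.pyRange a (m + 1) 3 =
      PySem.List.pyRange a m 3 ++ (if (m - a) % 3 = 0 then [m] else []) := by
  rw [PySem.List.pyRange_of_pos a (m+1) (by omega), PySem.List.pyRange_of_pos a m (by omega)]
  by_cases h0 : (m - a) % 3 = 0
  · rw [if_pos h0]
    have ha : a ≤ m := by omega
    have hc1 : (if a < m + 1 then ((m + 1 - a + 3 - 1) / 3).toNat else 0)
        = (if a < m then ((m - a + 3 - 1) / 3).toNat else 0) + 1 := by
      split_ifs <;> omega
    rw [hc1, List.range_succ, List.map_append]
    congr 1
    simp only [List.map_cons, List.map_nil]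
    congr 1
    split_ifs with hlt
    · omega
    · omega
  · rw [if_neg h0]
    have hc : (if a < m + 1 then ((m + 1 - a + 3 - 1) / 3).toNat else 0)
        = (if a < m then ((m - a + 3 - 1) / 3).toNat else 0) := by
      split_ifs <;> omega
    rw [hc, List.append_nil]

-- the classifying fold accumulates the two residue-class filters
theorem pvFold_classify (l : List Int) (o t : List Int) :
    l.foldl
      (fun (p : List Int × List Int) i =>
        let r := PySem.Int.mod i 3
        if r = 1 then (p.1 ++ [i], p.2)
        else if r = 2 then (p.1, p.2 ++ [i])
        else p) (o, t)
    = (o ++ l.filter (fun i => decide (PySem.Int.mod i 3 = 1)),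
       t ++ l.filter (fun i => decide (PySem.Int.mod i 3 = 2))) := by
  induction l generalizing o t with
  | nil => simp
  | cons x xs ih =>
    simp only [show ∀ i : Int, PySem.Int.mod i 3 = i % 3 from
      fun i => PySem.Int.mod_eq_emod_of_pos (by omega)] at ih ⊢
    simp only [List.foldl_cons, List.filter_cons]
    by_cases h1 : x % 3 = 1
    · simp [h1, ih]
    · by_cases h2 : x % 3 = 2
      · simp [h2, ih]
      · simp [h1, h2, ih]

-- the append-fold of A is plain append
theorem pvFold_append (l : List Int) (a : List Int) :
    l.foldl (fun acc i => acc ++ [i]) a = a ++ l := by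
  induction l generalizing a with
  | nil => simp
  | cons x xs ih => simp [ih]

-- the two residue filters of range(1, m) are the stride-3 ranges
theorem pvFilter_eq_range3 (N : Nat) :
    ((PySem.List.pyRange 1 (1 + N) 1).filter (fun i => decide (PySem.Int.mod i 3 = 1))
        = PySem.List.pyRange 1 (1 + N) 3)
    ∧ ((PySem.List.pyRange 1 (1 + N) 1).filter (fun i => decide (PySem.Int.mod i 3 = 2))
        = PySem.List.pyRange 2 (1 + N) 3) := by
  induction N with
  | zero => constructor <;> decide
  | succ k ih =>
    have hm : (1 : Int) + (k + 1 : Nat) = (1 + (k : Int)) + 1 := by push_cast; ring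
    rw [hm,
      PySem.List.pyRange_one_succ_right (by omega : (1:Int) ≤ 1 + (k:Int)),
      List.filter_append, List.filter_append,
      pvRange3_succ 1 (1 + (k:Int)) (by omega),
      pvRange3_succ 2 (1 + (k:Int)) (by omega)]
    constructor
    · rw [ih.1]
      congr 1
      have h0 : ((1:Int) + k - 1) % 3 = 0 ↔ (1 + (k:Int)) % 3 = 1 := by omega
      by_cases hp : (1 + (k:Int)) % 3 = 1
      · rw [if_pos (h0.mpr hp)]; simp [List.filter, hp]
      · rw [if_neg (fun hh => hp (h0.mp hh))]; simp [List.filter, hp]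
    · rw [ih.2]
      congr 1
      have h0 : ((1:Int) + k - 2) % 3 = 0 ↔ (1 + (k:Int)) % 3 = 2 := by omega
      by_cases hp : (1 + (k:Int)) % 3 = 2
      · rw [if_pos (h0.mpr hp)]; simp [List.filter, hp]
      · rw [if_neg (fun hh => hp (h0.mp hh))]; simp [List.filter, hp]

-- ===== VERDICT (by name: the statement is the Claim_ definition above) =====
theorem build_sample_indices_spec : Claim_equal_build_sample_indices := by
  intro n _
  unfold Spec_build_sample_indices build_sample_indices build_sample_indices_alt
  simp only []
  rw [pvFold_append, pvFold_append, pvFold_classify, List.nil_append]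
  by_cases h : n - 3 ≤ 1
  · rw [pvRange_eq_nil 1 (n-3) 1 (by omega) h, pvRange_eq_nil 1 (n-3) 3 (by omega) h,
      pvRange_eq_nil 2 (n-3) 3 (by omega) (by omega)]
    simp
  · obtain ⟨N, hN⟩ : ∃ N : Nat, n - 3 = 1 + (N : Int) := ⟨(n - 4).toNat, by omega⟩
    rw [hN, (pvFilter_eq_range3 N).1, (pvFilter_eq_range3 N).2]
    simp
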